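-- pv_equiv track=rewrite | github.com/Nivola/beehive | beehive/common/apimanager.py | get_all_valid_objids
-- ===== SOURCE A (Python) =====
-- def get_all_valid_objids(args):
--     """Get a list of authorization ids that map object
--
--     :param args: objid split by //
--     :return: list of valid objids
--     """
--     # first item *.*.*.....
--     act_obj = ['*' for i in args]
--     objdis = ['//'.join(act_obj)]
--     pos = 0
--     for arg in args:
--         act_obj[pos] = arg
--         objdis.append('//'.join(act_obj))
--         pos += 1
--
--     return objdis
-- ===== SOURCE B (Python) =====
-- def get_all_valid_objids(args):
--     """Get a list of authorization ids that map object
--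
--     :param args: objid split by //
--     :return: list of valid objids
--     """
--     args = list(args)
--     n = len(args)
--     # stars[m] is the pattern of m wildcards, built once by extension
--     stars = ['']
--     for m in range(1, n + 1):
--         stars.append('*' if m == 1 else stars[-1] + '//*')
--     # one growing prefix string; each output = prefix + star suffix, built once
--     out = [stars[n]]
--     pref = ''
--     for k, arg in enumerate(args, 1):
--         pref = arg if k == 1 else pref + '//' + arg
--         out.append(pref if k == n else pref + '//' + stars[n - k])
--     return out
-- ===== Notes on version B (the rewrite author's own statement) =====
-- stated objective: alternative
-- what changed: Replaced A's mutable template list re-joined with '//' at every step by two incremental string accumulations: a table of star-suffix patterns built once by extension and one growing prefix string, each output being a single concatenation of a prefix and a star suffix.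
import Mathlib
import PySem

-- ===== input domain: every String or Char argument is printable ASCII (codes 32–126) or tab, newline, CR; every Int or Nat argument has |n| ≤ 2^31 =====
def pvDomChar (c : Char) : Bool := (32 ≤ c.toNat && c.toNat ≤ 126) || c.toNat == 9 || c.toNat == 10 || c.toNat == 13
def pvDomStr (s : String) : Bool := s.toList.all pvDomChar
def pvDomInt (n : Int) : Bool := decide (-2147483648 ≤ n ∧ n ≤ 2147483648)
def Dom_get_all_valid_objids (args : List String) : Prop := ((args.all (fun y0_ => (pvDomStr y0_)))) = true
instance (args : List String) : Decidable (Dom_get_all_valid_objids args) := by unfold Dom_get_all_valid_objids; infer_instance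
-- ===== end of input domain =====

-- B replaces A's mutable template list (re-joined with '//' at every step) by two
-- incremental string accumulations: a star-suffix table built once by extension and one
-- growing prefix string; each output is a single concatenation (alternative algorithm).


-- ===== PORT A =====
-- loop state: (act_obj, objdis, pos); act_obj[pos] = arg becomes List.set (pos stays in range)
def get_all_valid_objids (args : List String) : List String :=
  let act_obj := args.map (fun _ => "*")
  let objdis := [PySem.Str.join "//" act_obj]
  let st := args.foldl
    (fun (st : List String × List String × Nat) arg =>
      let act := st.1.set st.2.2 arg
      (act, st.2.1 ++ [PySem.Str.join "//" act], st.2.2 + 1))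
    (act_obj, objdis, 0)
  st.2.1

-- ===== PORT B =====
-- stars[-1] and stars[n], stars[n-k] are ported with pyGetD (the lists are provably
-- long enough, so Python's indexing never raises and pyGetD with default "" is exact)
def get_all_valid_objids_alt (args : List String) : List String :=
  let n := args.length
  let stars := (PySem.List.pyRange 1 ((n : Int) + 1) 1).foldl
    (fun stars m =>
      stars ++ [if m == 1 then "*" else PySem.List.pyGetD stars (-1) "" ++ "//*"])
    [""]
  let st := (PySem.List.enumerate args 1).foldl
    (fun (st : String × List String) ka =>
      let pref := if ka.1 == 1 then ka.2 else st.1 ++ "//" ++ ka.2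
      (pref, st.2 ++ [if ka.1 == (n : Int) then pref
                      else pref ++ "//" ++ PySem.List.pyGetD stars ((n : Int) - ka.1) ""]))
    ("", [PySem.List.pyGetD stars (n : Int) ""])
  st.2

-- ===== PRECONDITION & SPEC =====
def Spec_get_all_valid_objids (args : List String) (out : List String) : Prop := out = get_all_valid_objids_alt args
instance (args : List String) (out : List String) : Decidable (Spec_get_all_valid_objids args out) := by unfold Spec_get_all_valid_objids; infer_instance

-- ===== CLAIM (what is proved, stated in full; the proofs are below) =====
def Claim_equal_get_all_valid_objids : Prop := ∀ (args : List String), Dom_get_all_valid_objids args → Spec_get_all_valid_objids args (get_all_valid_objids args)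

-- ===== LEMMAS AND PROOFS =====

-- the step function of A's loop, named for the proofs
def pvStep (st : List String × List String × Nat) (arg : String) : List String × List String × Nat :=
  let act := st.1.set st.2.2 arg
  (act, st.2.1 ++ [PySem.Str.join "//" act], st.2.2 + 1)

-- the objids contributed by A's loop when `pre` is already in place and `suf` remains
def pvContrib (pre suf : List String) : List String :=
  match suf with
  | [] => []
  | a :: rest =>
      PySem.Str.join "//" ((pre ++ [a]) ++ List.replicate rest.length "*") :: pvContrib (pre ++ [a]) rest

-- the common closed form both ports are reduced to
def pvF (args : List String) : List String :=
  (List.range (args.length + 1)).map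
    (fun k => PySem.Str.join "//" (args.take k ++ List.replicate (args.length - k) "*"))

theorem pvJoin_nil (sep : String) : PySem.Str.join sep [] = "" := by
  rw [← String.toList_inj]; simp [PySem.Str.toList_join, PySem.Chars.join_nil]

theorem pvJoin_singleton (sep x : String) : PySem.Str.join sep [x] = x := by
  rw [← String.toList_inj]; simp [PySem.Str.toList_join, PySem.Chars.join_singleton]

theorem pvJoin_cons_ne (sep x : String) (l : List String) (h : l ≠ []) :
    PySem.Str.join sep (x :: l) = x ++ sep ++ PySem.Str.join sep l := by
  obtain ⟨b, bs, rfl⟩ := List.exists_cons_of_ne_nil h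
  rw [← String.toList_inj]
  simp [PySem.Str.toList_join, PySem.Chars.join_cons_cons]

theorem pvLoop (suf : List String) : ∀ (pre acc : List String),
    (suf.foldl pvStep (pre ++ List.replicate suf.length "*", acc, pre.length)).2.1
      = acc ++ pvContrib pre suf := by
  induction suf with
  | nil => intro pre acc; simp [pvContrib]
  | cons a rest ih =>
      intro pre acc
      have h : pvStep (pre ++ List.replicate (a :: rest).length "*", acc, pre.length) a
          = ((pre ++ [a]) ++ List.replicate rest.length "*",
             acc ++ [PySem.Str.join "//" ((pre ++ [a]) ++ List.replicate rest.length "*")],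
             (pre ++ [a]).length) := by
        simp [pvStep, List.replicate_succ]
      simp only [List.foldl_cons, h, ih]
      simp [pvContrib]

theorem pvContrib_eq_map (suf : List String) : ∀ (pre : List String),
    pvContrib pre suf
      = (List.range suf.length).map
          (fun j => PySem.Str.join "//" ((pre ++ suf.take (j + 1)) ++ List.replicate (suf.length - (j + 1)) "*")) := by
  induction suf with
  | nil => intro pre; simp [pvContrib]
  | cons a rest ih =>
      intro pre
      simp only [pvContrib, ih, List.length_cons, List.range_succ_eq_map, List.map_cons, List.map_map]
      congr 1
      apply List.map_congr_left
      intro j hj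
      simp only [Function.comp_apply, List.take_succ_cons, Nat.succ_sub_succ]
      simp [List.append_assoc]

theorem pvA_eq_F (args : List String) : get_all_valid_objids args = pvF args := by
  have hmap : args.map (fun _ => "*") = List.replicate args.length "*" := by simp
  have hA : get_all_valid_objids args
      = [PySem.Str.join "//" (List.replicate args.length "*")] ++ pvContrib [] args := by
    have := pvLoop args [] [PySem.Str.join "//" (List.replicate args.length "*")]
    simpa [get_all_valid_objids, pvStep, hmap] using this
  rw [hA, pvContrib_eq_map]
  simp only [pvF, List.range_succ_eq_map, List.map_cons, List.map_map]
  simp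

def pvSj (m : Nat) : String := PySem.Str.join "//" (List.replicate m "*")

theorem pvJoin_append (sep : String) (l1 l2 : List String) (h1 : l1 ≠ []) (h2 : l2 ≠ []) :
    PySem.Str.join sep (l1 ++ l2) = PySem.Str.join sep l1 ++ sep ++ PySem.Str.join sep l2 := by
  induction l1 with
  | nil => exact absurd rfl h1
  | cons x xs ih =>
      rcases xs with _ | ⟨y, ys⟩
      · rw [List.singleton_append, pvJoin_cons_ne sep x l2 h2, pvJoin_singleton]
      · have hne : (y :: ys) ++ l2 ≠ [] := by simp
        rw [List.cons_append, pvJoin_cons_ne sep x _ hne, ih (by simp),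
          pvJoin_cons_ne sep x (y :: ys) (by simp)]
        simp [String.append_assoc]

theorem pvSj_succ (M : Nat) (h : 1 ≤ M) : pvSj (M + 1) = pvSj M ++ "//*" := by
  have hrep : List.replicate (M + 1) "*" = List.replicate M "*" ++ ["*"] :=
    List.replicate_succ' ..
  have hne : List.replicate M "*" ≠ ([] : List String) := by
    intro hc; have := congrArg List.length hc; simp at this; omega
  rw [pvSj, hrep, pvJoin_append "//" _ _ hne (by simp), pvJoin_singleton,
    String.append_assoc]
  rfl

-- the stars loop builds exactly the star patterns of each length
theorem pvStars (M : Nat) :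
    (PySem.List.pyRange 1 ((M : Int) + 1) 1).foldl
      (fun stars m =>
        stars ++ [if m == 1 then "*" else PySem.List.pyGetD stars (-1) "" ++ "//*"])
      [""]
    = (List.range (M + 1)).map pvSj := by
  induction M with
  | zero =>
      simp [PySem.List.pyRange, pvSj, pvJoin_nil]
  | succ m ih =>
      have hsplit : PySem.List.pyRange 1 ((↑(m + 1) : Int) + 1) 1
          = PySem.List.pyRange 1 ((m : Int) + 1) 1 ++ [((m : Int) + 1)] := by
        rw [PySem.List.pyRange_one_append 1 ((m : Int) + 1) ((↑(m + 1) : Int) + 1)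
          (by omega) (by push_cast; omega)]
        congr 1
        rw [PySem.List.pyRange_one_cons (by push_cast; omega), PySem.List.pyRange_one]
        simp
      rw [hsplit, List.foldl_append, ih]
      simp only [List.foldl_cons, List.foldl_nil]
      have hrange : List.range (m + 1 + 1) = List.range (m + 1) ++ [m + 1] := List.range_succ
      rw [hrange, List.map_append, List.map_singleton]
      congr 1
      rcases Nat.eq_zero_or_pos m with hm | hm
      · subst hm
        simp [pvSj, pvJoin_singleton]
      · have hcond : (((m : Int) + 1) == 1) = false := by
          simp only [beq_eq_false_iff_ne]; omega
        rw [hcond]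
        simp only [Bool.false_eq_true, if_false]
        have hlast : (List.range (m + 1)).map pvSj
            = (List.range m).map pvSj ++ [pvSj m] := by
          rw [List.range_succ, List.map_append, List.map_singleton]
        rw [hlast, PySem.List.pyGetD_neg_one_append_singleton, pvSj_succ m hm]

-- the element of the closed form pvF, named
def pvG (args : List String) (k : Nat) : String :=
  PySem.Str.join "//" (args.take k ++ List.replicate (args.length - k) "*")

-- the main loop invariant: each iteration appends the next pvG element
theorem pvMain (args : List String) (suf : List String) : ∀ (pre acc : List String) (s : Int),
    args = pre ++ suf → s = (pre.length : Int) + 1 →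
    ((PySem.List.enumerate suf s).foldl
      (fun (st : String × List String) ka =>
        ((if ka.1 == 1 then ka.2 else st.1 ++ "//" ++ ka.2),
         st.2 ++ [if ka.1 == (args.length : Int)
                  then (if ka.1 == 1 then ka.2 else st.1 ++ "//" ++ ka.2)
                  else (if ka.1 == 1 then ka.2 else st.1 ++ "//" ++ ka.2) ++ "//"
                    ++ PySem.List.pyGetD ((List.range (args.length + 1)).map pvSj)
                      ((args.length : Int) - ka.1) ""]))
      (PySem.Str.join "//" pre, acc)).2
    = acc ++ (List.range suf.length).map (fun j => pvG args (pre.length + 1 + j)) := by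
  induction suf with
  | nil =>
      intro pre acc s _ _
      simp [PySem.List.enumerate]
  | cons a rest ih =>
      intro pre acc s hargs hs
      have henum : PySem.List.enumerate (a :: rest) s
          = (s, a) :: PySem.List.enumerate rest (s + 1) := by
        simp [PySem.List.enumerate]
      rw [henum, List.foldl_cons]
      -- the updated prefix is the join of pre ++ [a]
      have hpref : (if (s == 1) then a else PySem.Str.join "//" pre ++ "//" ++ a)
          = PySem.Str.join "//" (pre ++ [a]) := by
        rcases pre with _ | ⟨p, ps⟩
        · simp only [List.length_nil, Nat.cast_zero, zero_add] at hs
          subst hs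
          simp [pvJoin_singleton]
        · have hcond : (s == 1) = false := by
            simp only [beq_eq_false_iff_ne, hs]
            simp only [List.length_cons]
            push_cast; omega
          rw [hcond]
          simp only [Bool.false_eq_true, if_false]
          rw [pvJoin_append "//" (p :: ps) [a] (by simp) (by simp), pvJoin_singleton]
      have hk : pre.length + 1 ≤ args.length := by
        subst hargs; simp
      have htake : args.take (pre.length + 1) = pre ++ [a] := by
        subst hargs
        rw [List.take_append]
        simp
      -- the appended element is pvG args (pre.length + 1)
      have helt : (if (s == (args.length : Int))
            then PySem.Str.join "//" (pre ++ [a])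
            else PySem.Str.join "//" (pre ++ [a]) ++ "//" ++ PySem.List.pyGetD
              ((List.range (args.length + 1)).map pvSj) ((args.length : Int) - s) "")
          = pvG args (pre.length + 1) := by
        rcases rest with _ | ⟨b, bs⟩
        · have hn : args.length = pre.length + 1 := by subst hargs; simp
          have hcond : (s == (args.length : Int)) = true := by
            simp only [beq_iff_eq, hs, hn]; omega
          rw [hcond, if_pos rfl]
          rw [pvG, htake, hn]
          simp
        · have hlt : pre.length + 1 < args.length := by
            subst hargs; simp
          have hcond : (s == (args.length : Int)) = false := by
            simp only [beq_eq_false_iff_ne, hs]; omega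
          rw [hcond]
          simp only [Bool.false_eq_true, if_false]
          have hcast : (args.length : Int) - s = ((args.length - (pre.length + 1) : Nat) : Int) := by
            rw [hs]; omega
          rw [hcast, PySem.List.pyGetD_natCast,
            PySem.List.getD_map_range pvSj _ _ "" (by omega)]
          rw [pvG, htake]
          have hrepne : List.replicate (args.length - (pre.length + 1)) "*" ≠ ([] : List String) := by
            intro hc; have := congrArg List.length hc; simp at this; omega
          rw [pvJoin_append "//" (pre ++ [a]) _ (by simp) hrepne]
          rfl
      simp only
      rw [hpref, helt]
      have hs' : s + 1 = ((pre ++ [a]).length : Int) + 1 := by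
        rw [hs]; simp only [List.length_append, List.length_singleton]; push_cast; omega
      rw [ih (pre ++ [a]) (acc ++ [pvG args (pre.length + 1)]) (s + 1)
        (by rw [hargs]; simp) hs']
      rw [List.append_assoc]
      congr 1
      rw [List.length_cons, List.range_succ_eq_map, List.map_cons, List.map_map]
      simp only [List.singleton_append]
      congr 1
      all_goals first
        | (congr 1; omega)
        | (apply List.map_congr_left
           intro j hj
           simp only [Function.comp_apply, List.length_append, List.length_singleton]
           congr 1
           omega)

theorem pvB_eq_F (args : List String) : get_all_valid_objids_alt args = pvF args := by
  simp only [get_all_valid_objids_alt]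
  rw [pvStars args.length]
  have h0 : PySem.List.pyGetD ((List.range (args.length + 1)).map pvSj)
      ((args.length : Int)) "" = pvSj args.length := by
    rw [PySem.List.pyGetD_natCast, PySem.List.getD_map_range pvSj _ _ _ (by omega)]
  rw [h0]
  have hm := pvMain args args [] [pvSj args.length] 1 (by simp) (by simp)
  rw [pvJoin_nil] at hm
  rw [hm]
  rw [pvF]
  rw [List.range_succ_eq_map, List.map_cons, List.map_map]
  simp only [List.singleton_append, List.length_nil]
  congr 1
  apply List.map_congr_left
  intro j hj
  simp only [Function.comp_apply, pvG, Nat.succ_eq_add_one]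
  rw [show 0 + 1 + j = j + 1 by omega]

-- ===== VERDICT (by name: the statement is the Claim_ definition above) =====
theorem get_all_valid_objids_spec : Claim_equal_get_all_valid_objids := by
  intro args _
  show get_all_valid_objids args = get_all_valid_objids_alt args
  rw [pvA_eq_F, pvB_eq_F]
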